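-- pv_equiv track=rewrite | github.com/Voldmare/rocFFT | library/src/device/kernel-generator.py | supported_small_sizes
-- ===== SOURCE A (Python) =====
-- import itertools
--
-- def product(*args):
--     """Cartesian product of input iteratables, as a list."""
--     return list(itertools.product(*args))
--
-- def supported_small_sizes(precision, pow2=True, pow3=True, pow5=True, commonRadix=True):
--     """Return list of 1D small kernels."""
--
--     upper_bound = {
--         'sp': 4096,
--         'dp': 4096,         # of course this isn't 2048... not sure why (double len 1594323 will fail)
--     }
--
--     powers = {
--         5: [5**k for k in range(6 if pow5 else 1)],
--         3: [3**k for k in range(8 if pow3 else 1)],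
--         2: [2**k for k in range(13 if pow2 else 1)],
--     }
--
--     lengths = [p2 * p3 * p5 for p2, p3, p5 in product(powers[2], powers[3], powers[5])]
--
--     # common radix 7, 11, and 13
--     if commonRadix:
--         lengths += [7, 14, 21, 28, 42, 49, 56, 84, 112, 168, 224, 336, 343]
--         lengths += [11, 22, 44, 88, 121, 176]
--         lengths += [13, 17, 26, 52, 104, 169, 208, 272, 528, 1040]
--
--     def filter_bound(length):
--         return length <= upper_bound[precision]
--
--     filtered = sorted([x for x in set(lengths) if filter_bound(x)])
--
--     return product(filtered, ['CS_KERNEL_STOCKHAM'])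
-- ===== SOURCE B (Python) =====
-- def supported_small_sizes(precision, pow2=True, pow3=True, pow5=True, commonRadix=True):
--     """Return list of 1D small kernels (smooth-number closure instead of a Cartesian product)."""
--     bound = {'sp': 4096, 'dp': 4096}[precision]
--
--     primes = [p for p, enabled in ((2, pow2), (3, pow3), (5, pow5)) if enabled]
--
--     # closure: multiply in one prime at a time, capped by the bound
--     vals = [1]
--     for p in primes:
--         nxt = []
--         for v in vals:
--             w = v
--             while w <= bound:
--                 nxt.append(w)
--                 w *= p
--         vals = nxt
--
--     if commonRadix:
--         extra = [7, 14, 21, 28, 42, 49, 56, 84, 112, 168, 224, 336, 343]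
--         extra += [11, 22, 44, 88, 121, 176]
--         extra += [13, 17, 26, 52, 104, 169, 208, 272, 528, 1040]
--         vals += [x for x in extra if x <= bound]
--
--     vals.sort()
--     return [(length, 'CS_KERNEL_STOCKHAM') for length in vals]
-- ===== Notes on version B (the rewrite author's own statement) =====
-- stated objective: alternative
-- what changed: Replaces the precomputed power lists and their 3-way Cartesian product plus set-dedup with a bound-capped smooth-number closure (fold over enabled primes with a capped multiply loop), which never produces values over the bound or duplicates, so the set() dedup and the post-filter on smooth values disappear.
import Mathlib
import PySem

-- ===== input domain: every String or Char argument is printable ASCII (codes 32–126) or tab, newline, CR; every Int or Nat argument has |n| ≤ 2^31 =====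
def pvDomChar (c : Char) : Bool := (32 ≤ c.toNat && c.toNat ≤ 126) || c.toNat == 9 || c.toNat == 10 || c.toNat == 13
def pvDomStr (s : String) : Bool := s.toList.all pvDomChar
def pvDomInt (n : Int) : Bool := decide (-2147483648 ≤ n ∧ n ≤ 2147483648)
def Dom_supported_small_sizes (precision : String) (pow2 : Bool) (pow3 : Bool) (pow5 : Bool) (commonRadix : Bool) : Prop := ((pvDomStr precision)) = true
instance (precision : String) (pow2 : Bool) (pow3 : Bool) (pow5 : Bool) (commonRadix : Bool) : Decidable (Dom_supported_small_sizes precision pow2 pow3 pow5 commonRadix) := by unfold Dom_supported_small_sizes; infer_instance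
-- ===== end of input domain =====

-- ===== PORT A =====
-- Port of A: power lists, Cartesian product, set-dedup, bound filter, sort, product with the scheme.
def supported_small_sizes (precision : String) (pow2 : Bool) (pow3 : Bool) (pow5 : Bool) (commonRadix : Bool) : List (Int × String) :=
  let upper_bound : PySem.Dict String Int := PySem.Dict.ofList [("sp", 4096), ("dp", 4096)]
  let powers5 : List Int := (PySem.List.pyRange 0 (if pow5 then 6 else 1) 1).map (fun k => (5:Int) ^ k.toNat)
  let powers3 : List Int := (PySem.List.pyRange 0 (if pow3 then 8 else 1) 1).map (fun k => (3:Int) ^ k.toNat)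
  let powers2 : List Int := (PySem.List.pyRange 0 (if pow2 then 13 else 1) 1).map (fun k => (2:Int) ^ k.toNat)
  let lengths : List Int := powers2.flatMap (fun p2 => powers3.flatMap (fun p3 => powers5.map (fun p5 => p2 * p3 * p5)))
  let lengths := if commonRadix then
      lengths ++ [7, 14, 21, 28, 42, 49, 56, 84, 112, 168, 224, 336, 343]
              ++ [11, 22, 44, 88, 121, 176]
              ++ [13, 17, 26, 52, 104, 169, 208, 272, 528, 1040]
    else lengths
  match PySem.Dict.get? upper_bound precision with
  | none => []   -- KeyError in filter_bound; excluded by Pre_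
  | some bound =>
    let filtered := PySem.List.sorted ((PySem.Set.ofList lengths).filter (fun x => decide (x ≤ bound))) (fun x => x) false
    filtered.flatMap (fun x => ["CS_KERNEL_STOCKHAM"].map (fun s => (x, s)))

-- ===== PORT B =====
-- B's inner while loop: emit w, w*p, w*p^2, ... while ≤ bound. Fuel (bound+2).toNat is
-- sufficient: w at least doubles each step, so the loop runs ≤ bound+1 times for 1 ≤ w.
def ssExpand (fuel : Nat) (p bound w : Int) : List Int :=
  match fuel with
  | 0 => []
  | f + 1 => if w ≤ bound then w :: ssExpand f p bound (w * p) else []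

def supported_small_sizes_alt (precision : String) (pow2 : Bool) (pow3 : Bool) (pow5 : Bool) (commonRadix : Bool) : List (Int × String) :=
  match PySem.Dict.get? (PySem.Dict.ofList [("sp", (4096:Int)), ("dp", 4096)]) precision with
  | none => []   -- KeyError; excluded by Pre_
  | some bound =>
    let primes : List Int := (if pow2 then [2] else []) ++ (if pow3 then [3] else []) ++ (if pow5 then [5] else [])
    let vals : List Int := primes.foldl (fun vs p => vs.flatMap (fun v => ssExpand (bound + 2).toNat p bound v)) [1]
    let vals := if commonRadix then
        vals ++ (([7, 14, 21, 28, 42, 49, 56, 84, 112, 168, 224, 336, 343]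
                  ++ [11, 22, 44, 88, 121, 176]
                  ++ [13, 17, 26, 52, 104, 169, 208, 272, 528, 1040] : List Int).filter (fun x => decide (x ≤ bound)))
      else vals
    (PySem.List.sorted vals (fun x => x) false).map (fun length => (length, "CS_KERNEL_STOCKHAM"))

-- ===== PRECONDITION & SPEC =====
-- Pre_ excludes exactly the precisions on which A's dict lookup raises KeyError.
def Pre_supported_small_sizes (precision : String) (pow2 : Bool) (pow3 : Bool) (pow5 : Bool) (commonRadix : Bool) : Prop :=
  precision = "sp" ∨ precision = "dp"
instance (precision : String) (pow2 : Bool) (pow3 : Bool) (pow5 : Bool) (commonRadix : Bool) : Decidable (Pre_supported_small_sizes precision pow2 pow3 pow5 commonRadix) := by unfold Pre_supported_small_sizes; infer_instance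

def pvWitness_supported_small_sizes : String × Bool × Bool × Bool × Bool := ("sp", true, true, true, true)

def Spec_supported_small_sizes (precision : String) (pow2 : Bool) (pow3 : Bool) (pow5 : Bool) (commonRadix : Bool) (out : List (Int × String)) : Prop := out = supported_small_sizes_alt precision pow2 pow3 pow5 commonRadix
instance (precision : String) (pow2 : Bool) (pow3 : Bool) (pow5 : Bool) (commonRadix : Bool) (out : List (Int × String)) : Decidable (Spec_supported_small_sizes precision pow2 pow3 pow5 commonRadix out) := by unfold Spec_supported_small_sizes; infer_instance

-- ===== CLAIM (what is proved, stated in full; the proofs are below) =====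
def Claim_equal_supported_small_sizes : Prop := ∀ (precision : String) (pow2 : Bool) (pow3 : Bool) (pow5 : Bool) (commonRadix : Bool), Dom_supported_small_sizes precision pow2 pow3 pow5 commonRadix → Pre_supported_small_sizes precision pow2 pow3 pow5 commonRadix → Spec_supported_small_sizes precision pow2 pow3 pow5 commonRadix (supported_small_sizes precision pow2 pow3 pow5 commonRadix)

-- ===== LEMMAS AND PROOFS =====

-- ===== VERDICT (by name: the statement is the Claim_ definition above) =====
set_option maxRecDepth 100000 in
set_option maxHeartbeats 4000000 in
theorem supported_small_sizes_spec : Claim_equal_supported_small_sizes := by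
  intro precision pow2 pow3 pow5 commonRadix _ hpre
  unfold Spec_supported_small_sizes
  rcases hpre with h | h <;> subst h <;>
    cases pow2 <;> cases pow3 <;> cases pow5 <;> cases commonRadix <;> decide
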